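-- pv_equiv track=rewrite | github.com/mcarbonell/neural-tablebases | src/generate_datasets_parallel.py | unrank_square_permutation
-- ===== SOURCE A (Python) =====
-- from typing import List, Tuple, Dict, Iterable, Optional, Literal
-- import math
--
-- def _perm(n: int, k: int) -> int:
--     """nPk (ordered selections without replacement)."""
--     if k < 0 or k > n:
--         return 0
--     perm_fn = getattr(math, "perm", None)
--     if perm_fn is not None:
--         return perm_fn(n, k)
--
--     out = 1
--     for x in range(n, n - k, -1):
--         out *= x
--     return out
--
-- def unrank_square_permutation(num_pieces: int, idx0: int) -> List[int]:
--     """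
--     Unrank the idx0-th k-permutation (ordered selection) of squares [0..63].
--
--     This is used for exhaustive permutation enumeration and for shuffled sampling.
--     """
--     n = 64
--     total = _perm(n, num_pieces)
--     if idx0 < 0 or idx0 >= total:
--         raise ValueError(f"Permutation index out of range: {idx0} (total={total})")
--
--     idx = idx0
--     available = list(range(n))
--     squares: List[int] = []
--
--     for i in range(num_pieces):
--         remaining_n = n - i
--         remaining_k = num_pieces - i - 1
--         block = _perm(remaining_n - 1, remaining_k) if remaining_k > 0 else 1
--         pick = idx // block
--         idx = idx % block
--         squares.append(available.pop(pick))
--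
--     return squares
-- ===== SOURCE B (Python) =====
-- import math
--
-- def unrank_square_permutation(num_pieces, idx0):
--     """Unrank the idx0-th k-permutation of squares [0..63] by mixed-radix
--     digit extraction from the least-significant end, then one pop pass."""
--     n = 64
--     total = math.perm(n, num_pieces) if 0 <= num_pieces <= n else 0
--     if idx0 < 0 or idx0 >= total:
--         raise ValueError(f"Permutation index out of range: {idx0} (total={total})")
--     picks = [0] * num_pieces
--     idx = idx0
--     for i in range(num_pieces - 1, -1, -1):
--         radix = n - i
--         picks[i] = idx % radix
--         idx //= radix
--     available = list(range(n))
--     squares = []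
--     for p in picks:
--         squares.append(available.pop(p))
--     return squares
-- ===== Notes on version B (the rewrite author's own statement) =====
-- stated objective: simpler
-- what changed: Replaces the per-step block = _perm(...) computation inside the unranking loop by a plain mixed-radix digit extraction from the least-significant end (idx % radix, idx //= radix), followed by a separate pop pass over the precomputed pick indices.
import Mathlib
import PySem

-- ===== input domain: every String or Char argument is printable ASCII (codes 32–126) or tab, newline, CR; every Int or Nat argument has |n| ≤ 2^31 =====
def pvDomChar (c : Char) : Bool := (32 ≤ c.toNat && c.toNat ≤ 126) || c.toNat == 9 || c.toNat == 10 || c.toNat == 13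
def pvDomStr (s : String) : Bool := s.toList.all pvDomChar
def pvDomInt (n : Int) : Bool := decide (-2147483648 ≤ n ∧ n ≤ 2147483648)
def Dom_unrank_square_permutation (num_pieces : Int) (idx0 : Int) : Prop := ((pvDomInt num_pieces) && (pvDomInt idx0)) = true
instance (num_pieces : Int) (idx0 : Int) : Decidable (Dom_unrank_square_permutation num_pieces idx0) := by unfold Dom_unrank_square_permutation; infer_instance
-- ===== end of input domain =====

-- B replaces the per-step _perm block computation by least-significant-first mixed-radix
-- digit extraction plus a separate pop pass (simpler decomposition, same exact values).

-- ===== PORT A =====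
-- _perm(n, k): math.perm(n, k) and the fallback loop compute the same product
-- prod over range(n, n-k, -1); ported as that product (exact for all int n, k).
def pvPermA (n : Int) (k : Int) : Int :=
  if k < 0 ∨ k > n then 0
  else (PySem.List.pyRange n (n - k) (-1)).foldl (· * ·) 1

-- one iteration of A's loop body (state = (idx, available, squares))
def pvStepA (num_pieces : Int) (st : Int × List Int × List Int) (i : Int) : Int × List Int × List Int :=
  let idx := st.1
  let available := st.2.1
  let squares := st.2.2
  let remaining_n : Int := 64 - i
  let remaining_k : Int := num_pieces - i - 1
  let block := if remaining_k > 0 then pvPermA (remaining_n - 1) remaining_k else 1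
  let pick := PySem.Int.floordiv idx block
  let idx' := PySem.Int.mod idx block
  match PySem.List.pop? available pick with
  | some (x, rest) => (idx', rest, squares ++ [x])
  | none => (idx', available, squares)  -- IndexError: unreachable under Pre_

def unrank_square_permutation (num_pieces : Int) (idx0 : Int) : List Int :=
  let n : Int := 64
  let total := pvPermA n num_pieces
  if idx0 < 0 ∨ total ≤ idx0 then []  -- ValueError: excluded by Pre_
  else
    ((PySem.List.pyRange 0 num_pieces 1).foldl (pvStepA num_pieces)
      (idx0, PySem.List.pyRange 0 n 1, ([] : List Int))).2.2

-- ===== PORT B =====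
-- math.perm(n, k) for 0 <= k <= n is the falling factorial
def pvPermB (n : Int) (k : Int) : Int :=
  if 0 ≤ k ∧ k ≤ n then ((Nat.descFactorial n.toNat k.toNat : Nat) : Int) else 0

-- one iteration of B's first loop (i counts down; picks built front-to-back by consing)
def pvStepB1 (st : List Int × Int) (i : Int) : List Int × Int :=
  let radix : Int := 64 - i
  (PySem.Int.mod st.2 radix :: st.1, PySem.Int.floordiv st.2 radix)

-- one iteration of B's second loop (state = (available, squares))
def pvStepB2 (st : List Int × List Int) (p : Int) : List Int × List Int :=
  match PySem.List.pop? st.1 p with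
  | some (x, rest) => (rest, st.2 ++ [x])
  | none => st  -- IndexError: unreachable under Pre_

def unrank_square_permutation_alt (num_pieces : Int) (idx0 : Int) : List Int :=
  let n : Int := 64
  let total := pvPermB n num_pieces
  if idx0 < 0 ∨ total ≤ idx0 then []  -- ValueError: excluded by Pre_
  else
    let picks := ((PySem.List.pyRange (num_pieces - 1) (-1) (-1)).foldl pvStepB1
      (([] : List Int), idx0)).1
    (picks.foldl pvStepB2 (PySem.List.pyRange 0 n 1, ([] : List Int))).2

-- ===== PRECONDITION & SPEC =====
-- Pre_ excludes exactly the inputs on which A raises ValueError (index out of range;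
-- num_pieces < 0 or > 64 makes total = 0, so no index is in range there).
def Pre_unrank_square_permutation (num_pieces : Int) (idx0 : Int) : Prop :=
  0 ≤ num_pieces ∧ num_pieces ≤ 64 ∧ 0 ≤ idx0 ∧ idx0 < ((Nat.descFactorial 64 num_pieces.toNat : Nat) : Int)
instance (num_pieces : Int) (idx0 : Int) : Decidable (Pre_unrank_square_permutation num_pieces idx0) := by
  unfold Pre_unrank_square_permutation; infer_instance

def pvWitness_unrank_square_permutation : Int × Int := (3, 1000)

def Spec_unrank_square_permutation (num_pieces : Int) (idx0 : Int) (out : List Int) : Prop := out = unrank_square_permutation_alt num_pieces idx0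
instance (num_pieces : Int) (idx0 : Int) (out : List Int) : Decidable (Spec_unrank_square_permutation num_pieces idx0 out) := by unfold Spec_unrank_square_permutation; infer_instance

-- ===== CLAIM (what is proved, stated in full; the proofs are below) =====
def Claim_equal_unrank_square_permutation : Prop := ∀ (num_pieces : Int) (idx0 : Int), Dom_unrank_square_permutation num_pieces idx0 → Pre_unrank_square_permutation num_pieces idx0 → Spec_unrank_square_permutation num_pieces idx0 (unrank_square_permutation num_pieces idx0)

-- ===== LEMMAS AND PROOFS =====

-- abstract digit extraction, most-significant first
def msbN : List Nat → Nat → List Nat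
  | [], _ => []
  | _ :: rs, m => (m / rs.prod) :: msbN rs (m % rs.prod)

-- abstract digit extraction, least-significant first
def lsbN : List Nat → Nat → List Nat
  | [], _ => []
  | r :: rs, m => (m % r) :: lsbN rs (m / r)

-- the common pop pass
def popFoldI : List Int → List Int × List Int → List Int × List Int
  | [], st => st
  | p :: ps, st =>
      match PySem.List.pop? st.1 p with
      | some (x, rest) => popFoldI ps (rest, st.2 ++ [x])
      | none => popFoldI ps st

-- A's digit sequence along a list of loop indices
def dListA (np : Int) : List Int → Int → List Int
  | [], _ => []
  | i :: l, idx =>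
      let block := if np - i - 1 > 0 then pvPermA (64 - i - 1) (np - i - 1) else 1
      PySem.Int.floordiv idx block :: dListA np l (PySem.Int.mod idx block)

-- B's first loop as a structural recursion on the iteration count
def bPhase1 : Nat → List Int → Int → List Int × Int
  | 0, ps, idx => (ps, idx)
  | c + 1, ps, idx =>
      bPhase1 c (PySem.Int.mod idx (64 - (c : Int)) :: ps) (PySem.Int.floordiv idx (64 - (c : Int)))

-- A's radix list for loop positions i..k-1
def msbList (i k : Nat) : List Nat := (List.range (k - i)).map (fun j => 64 - (i + j))

theorem lsbN_append (xs ys : List Nat) (m : Nat) :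
    lsbN (xs ++ ys) m = lsbN xs m ++ lsbN ys (m / xs.prod) := by
  induction xs generalizing m with
  | nil => simp [lsbN]
  | cons r xs ih => simp [lsbN, ih, Nat.div_div_eq_div_mul, List.prod_cons]

theorem lsbN_mod (rs : List Nat) (m : Nat) : lsbN rs (m % rs.prod) = lsbN rs m := by
  induction rs generalizing m with
  | nil => simp [lsbN]
  | cons r rs ih =>
      simp only [lsbN, List.prod_cons]
      rw [Nat.mod_mod_of_dvd m ⟨rs.prod, rfl⟩, Nat.mod_mul_right_div_self, ih]

theorem msbN_eq_lsbN_reverse (rs : List Nat) (m : Nat) (h : m < rs.prod) :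
    msbN rs m = (lsbN rs.reverse m).reverse := by
  induction rs generalizing m with
  | nil => simp [msbN, lsbN]
  | cons r rs ih =>
      have hP : 0 < rs.prod := by
        rcases Nat.eq_zero_or_pos rs.prod with h0 | h0
        · simp [List.prod_cons, h0] at h
        · exact h0
      have hdiv : m / rs.prod < r := by
        rw [Nat.div_lt_iff_lt_mul hP]; rw [List.prod_cons] at h; omega
      have hprodrev : rs.reverse.prod = rs.prod := List.prod_reverse rs
      rw [List.reverse_cons, lsbN_append, hprodrev]
      simp only [lsbN, List.reverse_append, List.reverse_cons, List.reverse_nil, List.nil_append,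
        Nat.mod_eq_of_lt hdiv]
      rw [← lsbN_mod rs.reverse m, hprodrev]
      rw [msbN, ih (m % rs.prod) (Nat.mod_lt m hP)]
      simp

-- falling-factorial product: A's _perm equals Nat.descFactorial on the admitted domain
theorem prod_range_sub (n k : Nat) (h : k ≤ n) :
    ((List.range k).map (fun j : Nat => (n : Int) - (j : Int))).foldl (· * ·) 1
      = ((Nat.descFactorial n k : Nat) : Int) := by
  induction k with
  | zero => simp
  | succ k ih =>
      rw [List.range_succ, List.map_append, List.foldl_append, ih (by omega)]
      simp [Nat.descFactorial_succ]
      have : ((n - k : Nat) : Int) = (n : Int) - (k : Int) := by omega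
      rw [this]; ring

theorem pvPermA_eq (n k : Nat) (h : k ≤ n) :
    pvPermA (n : Int) (k : Int) = ((Nat.descFactorial n k : Nat) : Int) := by
  unfold pvPermA
  rw [if_neg (by omega)]
  rw [PySem.List.pyRange_neg_one]
  have : ((n : Int) - ((n : Int) - (k : Int))).toNat = k := by omega
  rw [this]
  exact prod_range_sub n k h

theorem prod_map_range_sub (n i c : Nat) :
    ((List.range c).map (fun j => n - (i + j))).prod = Nat.descFactorial (n - i) c := by
  induction c with
  | zero => simp
  | succ c ih =>
      rw [List.range_succ, List.map_append, List.prod_append, ih]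
      simp only [List.map_cons, List.map_nil, List.prod_cons, List.prod_nil, Nat.mul_one]
      rw [Nat.descFactorial_succ, Nat.mul_comm]
      congr 1
      omega

theorem msbList_prod (i k : Nat) :
    (msbList i k).prod = Nat.descFactorial (64 - i) (k - i) := by
  unfold msbList
  exact prod_map_range_sub 64 i (k - i)

theorem msbList_cons (i k : Nat) (h : i < k) :
    msbList i k = (64 - i) :: msbList (i + 1) k := by
  unfold msbList
  have hc : k - i = (k - (i + 1)) + 1 := by omega
  rw [hc, List.range_succ_eq_map, List.map_cons, List.map_map]
  congr 1
  exact List.map_congr_left (fun j _ => by simp [Function.comp]; omega)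

theorem msbList_zero_succ (c : Nat) :
    msbList 0 (c + 1) = msbList 0 c ++ [64 - c] := by
  simp [msbList, List.range_succ]

-- fusion of A's loop: digits then pops
theorem fuseA (np : Int) (l : List Int) (idx : Int) (av sq : List Int) :
    (l.foldl (pvStepA np) (idx, av, sq)).2 = popFoldI (dListA np l idx) (av, sq) := by
  induction l generalizing idx av sq with
  | nil => simp [dListA, popFoldI]
  | cons i l ih =>
      simp only [List.foldl_cons, dListA, popFoldI]
      unfold pvStepA
      cases hp : PySem.List.pop? av (PySem.Int.floordiv idx (if np - i - 1 > 0 then pvPermA (64 - i - 1) (np - i - 1) else 1)) with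
      | none => simp only [hp]; exact ih _ _ _
      | some r => simp only [hp]; exact ih _ _ _

-- B's second loop is the pop pass
theorem fuseB2 (l : List Int) (st : List Int × List Int) :
    l.foldl pvStepB2 st = popFoldI l st := by
  induction l generalizing st with
  | nil => rfl
  | cons p ps ih =>
      simp only [List.foldl_cons, popFoldI]
      unfold pvStepB2
      cases hp : PySem.List.pop? st.1 p with
      | none => exact ih _
      | some r => exact ih _

-- B's first loop computed by bPhase1
theorem foldB1 (c : Nat) (ps : List Int) (idx : Int) :
    (PySem.List.pyRange ((c : Int) - 1) (-1) (-1)).foldl pvStepB1 (ps, idx) = bPhase1 c ps idx := by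
  induction c generalizing ps idx with
  | zero => rw [PySem.List.pyRange_neg_one_eq_nil (by omega)]; rfl
  | succ c ih =>
      have h1 : ((c + 1 : Nat) : Int) - 1 = (c : Int) := by push_cast; ring
      rw [h1, PySem.List.pyRange_neg_one_cons (by omega), List.foldl_cons, ih]
      rfl

-- bPhase1 produces the reversed LSB digits
theorem bPhase1_eq (c : Nat) (hc : c ≤ 64) (ps : List Int) (m : Nat) :
    (bPhase1 c ps (m : Int)).1
      = ((lsbN ((msbList 0 c).reverse) m).map (fun x => (x : Int))).reverse ++ ps := by
  induction c generalizing ps m with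
  | zero => simp [bPhase1, msbList, lsbN]
  | succ c ih =>
      have hr : (64 : Int) - (c : Int) = ((64 - c : Nat) : Int) := by omega
      rw [bPhase1, hr, PySem.Int.mod_natCast, PySem.Int.floordiv_natCast,
        ih (by omega), msbList_zero_succ]
      rw [List.reverse_append, List.reverse_singleton, List.singleton_append, lsbN]
      simp [List.append_assoc]

theorem pv_map_rev (l : List Nat) :
    (l.reverse.map (fun x => (x : Int))) = (l.map (fun x => (x : Int))).reverse := by
  induction l with
  | nil => rfl
  | cons x l ih =>
      simp at ih
      simp [ih]

-- A's digits are the MSB digits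
theorem dListA_eq (k : Nat) (hk : k ≤ 64) :
    ∀ (c i : Nat), k - i = c → i ≤ k → ∀ m : Nat,
      dListA (k : Int) (PySem.List.pyRange (i : Int) (k : Int) 1) (m : Int)
        = (msbN (msbList i k) m).map (fun x => (x : Int)) := by
  intro c
  induction c with
  | zero =>
      intro i hci hik m
      rw [PySem.List.pyRange_one_eq_nil (by omega)]
      have : k - i = 0 := hci
      simp [dListA, msbList, this, msbN]
  | succ c ih =>
      intro i hci hik m
      have hik' : i < k := by omega
      rw [PySem.List.pyRange_one_cons (by exact_mod_cast Int.ofNat_lt.mpr hik')]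
      have hcast : (i : Int) + 1 = ((i + 1 : Nat) : Int) := by push_cast; ring
      rw [hcast]
      simp only [dListA]
      have hblock : (if (k : Int) - (i : Int) - 1 > 0 then pvPermA (64 - (i : Int) - 1) ((k : Int) - (i : Int) - 1) else 1)
          = (((msbList (i + 1) k).prod : Nat) : Int) := by
        by_cases hlast : i + 1 = k
        · rw [if_neg (by omega)]
          simp [msbList, hlast]
        · rw [if_pos (by omega)]
          have e1 : (64 : Int) - (i : Int) - 1 = ((63 - i : Nat) : Int) := by omega
          have e2 : (k : Int) - (i : Int) - 1 = ((k - i - 1 : Nat) : Int) := by omega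
          rw [e1, e2, pvPermA_eq (63 - i) (k - i - 1) (by omega), msbList_prod]
          congr 2
          omega
      rw [hblock, PySem.Int.floordiv_natCast, PySem.Int.mod_natCast,
        ih (i + 1) (by omega) (by omega) (m % (msbList (i + 1) k).prod),
        msbList_cons i k hik', msbN]
      simp

-- ===== VERDICT (by name: the statement is the Claim_ definition above) =====
theorem unrank_square_permutation_spec : Claim_equal_unrank_square_permutation := by
  intro np idx0 _ hpre
  obtain ⟨hnp0, hnp64, hidx0, hidxlt⟩ := hpre
  unfold Spec_unrank_square_permutation
  set k : Nat := np.toNat with hkdef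
  set m : Nat := idx0.toNat with hmdef
  have hnp : np = (k : Int) := (Int.toNat_of_nonneg hnp0).symm
  have hm : idx0 = (m : Int) := (Int.toNat_of_nonneg hidx0).symm
  have hk64 : k ≤ 64 := by omega
  have hmlt : m < Nat.descFactorial 64 k := by rw [hm] at hidxlt; exact_mod_cast hidxlt
  -- both range checks pass, with the same total
  have htotA : pvPermA 64 np = ((Nat.descFactorial 64 k : Nat) : Int) := by
    rw [hnp]
    have h64 : (64 : Int) = ((64 : Nat) : Int) := by norm_num
    rw [h64, pvPermA_eq 64 k hk64]
  have htotB : pvPermB 64 np = ((Nat.descFactorial 64 k : Nat) : Int) := by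
    unfold pvPermB
    rw [if_pos ⟨hnp0, hnp64⟩, show (64 : Int).toNat = 64 from rfl, ← hkdef]
  unfold unrank_square_permutation unrank_square_permutation_alt
  simp only []
  rw [htotA, htotB, if_neg (by omega), if_neg (by omega)]
  -- A side: fuse the loop, then express the digits
  rw [hnp, hm, fuseA, fuseB2, foldB1]
  have h0 : (0 : Int) = ((0 : Nat) : Int) := by norm_num
  have hA : dListA (k : Int) (PySem.List.pyRange ((0 : Nat) : Int) (k : Int) 1) (m : Int)
      = (msbN (msbList 0 k) m).map (fun x => (x : Int)) :=
    dListA_eq k hk64 (k - 0) 0 rfl (by omega) m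
  rw [h0, hA, bPhase1_eq k hk64 [] m]
  have hprod : m < (msbList 0 k).prod := by
    rw [msbList_prod]; simpa using hmlt
  rw [msbN_eq_lsbN_reverse _ _ hprod, List.append_nil]
  congr 2
  exact pv_map_rev _
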